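-- pv_equiv track=rewrite | github.com/lazygan/LanguageSupportAutoDiff | parseres/scheme_parser.py | next_candidate_token
-- ===== SOURCE A (Python) =====
-- _WHITESPACE = set(' \t\n\r')
--
-- _SINGLE_CHAR_TOKENS = set("()")
--
-- _TOKEN_END = _WHITESPACE | _SINGLE_CHAR_TOKENS
--
-- def next_candidate_token(line, k):
--     while k < len(line):
--         c = line[k]
--         if c == ';':
--             return None, len(line)
--         elif c in _WHITESPACE:
--             k += 1
--         elif c in _SINGLE_CHAR_TOKENS:
--             if c == ']': c = ')'
--             if c == '[': c = '('
--             return c, k+1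
--         elif c == '#':  # Boolean values #t and #f
--             return line[k:k+2], min(k+2, len(line))
--         elif c == ',': # Unquote; check for @
--             if k+1 < len(line) and line[k+1] == '@':
--                 return ',@', k+2
--             return c, k+1
--         else:
--             j = k
--             while j < len(line) and line[j] not in _TOKEN_END:
--                 j += 1
--             return line[k:j], min(j, len(line))
--     return None, len(line)
-- ===== SOURCE B (Python) =====
-- def next_candidate_token(line, k):
--     n = len(line)
--     tail = line[k:].lstrip(' \t\n\r')
--     if not tail or tail[0] == ';':
--         return None, n
--     i = n - len(tail)
--     c = tail[0]
--     if c in '()':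
--         return c, i + 1
--     if c == '#':
--         return tail[:2], min(i + 2, n)
--     if c == ',':
--         return (',@', i + 2) if tail[1:2] == '@' else (',', i + 1)
--     ends = [p for p, ch in enumerate(tail) if ch in ' \t\n\r()']
--     j = ends[0] if ends else len(tail)
--     return tail[:j], i + j
-- ===== Notes on version B (the rewrite author's own statement) =====
-- stated objective: idiomatic
-- what changed: B replaces A's index-stepping while-loop with per-character dispatch by a two-phase form: slice off line[k:], lstrip the whitespace in one call, then classify the head of the remaining suffix, finding a plain token's end with a single enumerate-comprehension instead of an inner index loop.
-- intended difference: For -len(line) <= k < 0 A reads line[k] via Python's negative-index wraparound (its whitespace skip can even rescan the beginning of the line) and returns tokens/positions computed from negative indices, e.g. A('(', -1) = ('(', 0); B treats k as the clamped start of the suffix line[k:] and returns ('(', 1), the intended reading of a tokenizer position. — e.g. on next_candidate_token("(", -1): A returns (some "(", 0), B returns (some "(", 1)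
import Mathlib
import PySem

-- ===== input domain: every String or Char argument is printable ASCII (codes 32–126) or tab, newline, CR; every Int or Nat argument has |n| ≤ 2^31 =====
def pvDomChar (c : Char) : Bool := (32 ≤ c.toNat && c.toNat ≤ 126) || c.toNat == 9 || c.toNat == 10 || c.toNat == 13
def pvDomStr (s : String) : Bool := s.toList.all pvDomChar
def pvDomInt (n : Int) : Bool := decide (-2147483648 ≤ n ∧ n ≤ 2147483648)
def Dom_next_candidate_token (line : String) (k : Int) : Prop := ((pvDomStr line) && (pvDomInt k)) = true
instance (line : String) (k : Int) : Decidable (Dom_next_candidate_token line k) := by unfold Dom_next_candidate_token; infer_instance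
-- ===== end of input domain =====

-- B re-implements the tokenizer by slicing off line[k:], lstrip-ping the whitespace and classifying
-- the head of the remaining suffix (idiomatic two-phase form); equivalence of the RETURN value is
-- proved for 0 ≤ k; A's negative-index wraparound region is stated as an intended difference D_.

-- ===== PORT A =====
def pvWS (c : Char) : Bool := c == ' ' || c == '\t' || c == '\n' || c == '\r'     -- c in _WHITESPACE
def pvSingle (c : Char) : Bool := c == '(' || c == ')'                            -- c in _SINGLE_CHAR_TOKENS
def pvEnd (c : Char) : Bool := pvWS c || pvSingle c                               -- c in _TOKEN_END

-- inner 'while j < len(line) and line[j] not in _TOKEN_END: j += 1'; fuel = (len - j).toNat, so fuel = 0 iff j ≥ len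
def pvScanA (s : List Char) (j : Int) : Nat → Int
  | 0 => j
  | fuel + 1 =>
    match PySem.List.pyGet? s j with
    | some c => if pvEnd c then j else pvScanA s (j + 1) fuel
    | none => j      -- unreachable: j stays in index range while fuel > 0 under Pre_

-- outer 'while k < len(line)' loop; fuel = (len - k).toNat, so fuel = 0 iff k ≥ len
def pvLoopA (s : List Char) (k : Int) : Nat → Option String × Int
  | 0 => ((none : Option String), (s.length : Int))
  | fuel + 1 =>
    let n : Int := s.length
    match PySem.List.pyGet? s k with
    | none => (none, n)      -- Python raises IndexError here; excluded by Pre_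
    | some c0 =>
      if c0 = ';' then (none, n)
      else if pvWS c0 then pvLoopA s (k + 1) fuel
      else if pvSingle c0 then
        let c1 := if c0 = ']' then ')' else c0    -- dead remaps kept from A (c0 is '(' or ')')
        let c2 := if c1 = '[' then '(' else c1
        (some (String.ofList [c2]), k + 1)
      else if c0 = '#' then
        (some (String.ofList (PySem.List.slice s (some k) (some (k + 2)))), min (k + 2) n)
      else if c0 = ',' then
        if k + 1 < n ∧ PySem.List.pyGet? s (k + 1) = some '@' then (some ",@", k + 2)
        else (some (String.ofList [c0]), k + 1)
      else
        let j := pvScanA s k (n - k).toNat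
        (some (String.ofList (PySem.List.slice s (some k) (some j))), min j n)

def next_candidate_token (line : String) (k : Int) : Option String × Int :=
  pvLoopA line.toList k (((line.toList.length : Int) - k).toNat)

-- ===== PORT B =====
def pvWSB (c : Char) : Bool := (" \t\n\r".toList).contains c                      -- lstrip(' \t\n\r') char class
def pvSingleB (c : Char) : Bool := ("()".toList).contains c                       -- c in '()'
def pvEndB (c : Char) : Bool := (" \t\n\r()".toList).contains c                   -- ch in ' \t\n\r()'

def pvAltCore (s : List Char) (k : Int) : Option String × Int :=
  let n : Int := s.length
  let tail := (PySem.List.slice s (some k) none).dropWhile pvWSB                  -- line[k:].lstrip(' \t\n\r')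
  match tail with
  | [] => (none, n)                                                               -- not tail
  | c :: _ =>
    if c = ';' then (none, n)
    else
      let i : Int := n - tail.length
      if pvSingleB c then (some (String.ofList [c]), i + 1)
      else if c = '#' then (some (String.ofList (tail.take 2)), min (i + 2) n)
      else if c = ',' then
        if PySem.List.slice tail (some 1) (some 2) = ['@'] then (some ",@", i + 2)
        else (some ",", i + 1)
      else
        -- ends = [p for p, ch in enumerate(tail) if ch in ' \t\n\r()']; j = ends[0] if ends else len(tail)
        let ends := ((PySem.List.enumerate tail).filter (fun pc => pvEndB pc.2)).map Prod.fst
        let j : Int := ends.headD (tail.length : Int)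
        (some (String.ofList (PySem.List.slice tail none (some j))), i + j)

def next_candidate_token_alt (line : String) (k : Int) : Option String × Int :=
  pvAltCore line.toList k

-- ===== PRECONDITION & SPEC =====
-- Pre_ excludes exactly the inputs where A raises IndexError: k < -len(line) (line[k] out of range).
def Pre_next_candidate_token (line : String) (k : Int) : Prop :=
  -(PySem.Str.len line) ≤ k
instance (line : String) (k : Int) : Decidable (Pre_next_candidate_token line k) := by
  unfold Pre_next_candidate_token; infer_instance
def pvWitness_next_candidate_token : String × Int := ("(foo)", 0)

-- For -len(line) ≤ k < 0 A reads line[k] by Python's negative-index wraparound (and its whitespace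
-- skip can rescan the beginning of the line, returning tokens respectively positions computed from
-- negative indices); B treats k as the clamped start of the suffix line[k:] and tokenizes that,
-- which is the intended reading of a tokenizer position.
def D_next_candidate_token (line : String) (k : Int) : Prop :=
  -(PySem.Str.len line) ≤ k ∧ k < 0
instance (line : String) (k : Int) : Decidable (D_next_candidate_token line k) := by
  unfold D_next_candidate_token; infer_instance

def Spec_next_candidate_token (line : String) (k : Int) (out : Option String × Int) : Prop :=
  ¬ D_next_candidate_token line k → out = next_candidate_token_alt line k
instance (line : String) (k : Int) (out : Option String × Int) : Decidable (Spec_next_candidate_token line k out) := by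
  unfold Spec_next_candidate_token; infer_instance

def pvDiffWitness_next_candidate_token : String × Int := ("(", -1)
def pvDiffWitnessOut_next_candidate_token : (Option String × Int) × (Option String × Int) :=
  ((some "(", 0), (some "(", 1))

-- ===== CLAIM (what is proved, stated in full; the proofs are below) =====
def Claim_unchanged_next_candidate_token : Prop := ∀ (line : String) (k : Int), Dom_next_candidate_token line k → Pre_next_candidate_token line k → Spec_next_candidate_token line k (next_candidate_token line k)
def Claim_changed_next_candidate_token : Prop := Dom_next_candidate_token (pvDiffWitness_next_candidate_token.1) (pvDiffWitness_next_candidate_token.2) ∧ Pre_next_candidate_token (pvDiffWitness_next_candidate_token.1) (pvDiffWitness_next_candidate_token.2) ∧ D_next_candidate_token (pvDiffWitness_next_candidate_token.1) (pvDiffWitness_next_candidate_token.2) ∧ next_candidate_token (pvDiffWitness_next_candidate_token.1) (pvDiffWitness_next_candidate_token.2) = pvDiffWitnessOut_next_candidate_token.1 ∧ next_candidate_token_alt (pvDiffWitness_next_candidate_token.1) (pvDiffWitness_next_candidate_token.2) = pvDiffWitnessOut_next_candidate_token.2 ∧ pvDiffWitnessOut_next_candidate_token.1 ≠ pvDiff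WitnessOut_next_candidate_token.2
-- ===== LEMMAS AND PROOFS =====

lemma pvWSB_eq (c : Char) : pvWSB c = pvWS c := by
  apply Bool.eq_iff_iff.mpr
  simp [pvWSB, pvWS, show (" \t\n\r".toList) = [' ', '\t', '\n', '\r'] from rfl]
  tauto

lemma pvSingleB_eq (c : Char) : pvSingleB c = pvSingle c := by
  apply Bool.eq_iff_iff.mpr
  simp [pvSingleB, pvSingle, show ("()".toList) = ['(', ')'] from rfl]

lemma pvEndB_eq (c : Char) : pvEndB c = pvEnd c := by
  apply Bool.eq_iff_iff.mpr
  simp [pvEndB, pvEnd, pvWS, pvSingle,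
    show (" \t\n\r()".toList) = [' ', '\t', '\n', '\r', '(', ')'] from rfl]
  tauto

lemma pv_scan (s : List Char) (t : List Char) : ∀ (k : Nat), s.drop k = t →
    pvScanA s (k : Int) (((s.length : Int) - (k : Int)).toNat) =
      (k : Int) + ((t.takeWhile (fun c => !pvEnd c)).length : Int) := by
  induction t with
  | nil =>
    intro k hdrop
    have hk : s.length ≤ k := by
      by_contra h
      exact absurd hdrop (by simp [List.drop_eq_nil_iff]; omega)
    have : (((s.length : Int) - (k : Int)).toNat) = 0 := by omega
    rw [this]
    simp [pvScanA]
  | cons c t ih =>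
    intro k hdrop
    have hk : k < s.length := by
      by_contra h
      rw [List.drop_eq_nil_of_le (by omega)] at hdrop
      simp at hdrop
    have hget : s[k] = c := by
      have := List.drop_eq_getElem_cons hk
      rw [hdrop] at this
      exact (List.cons.injEq _ _ _ _ ▸ this).1.symm
    have hfuel : (((s.length : Int) - (k : Int)).toNat) = (((s.length : Int) - ((k:Int) + 1)).toNat) + 1 := by omega
    rw [hfuel]
    simp only [pvScanA, PySem.List.pyGet?_natCast, List.getElem?_eq_getElem hk, hget]
    by_cases h : pvEnd c
    · simp [h]
    · simp only [h, Bool.false_eq_true, if_false, List.takeWhile_cons, Bool.not_false, if_true]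
      have ht : s.drop (k+1) = t := by
        have := List.drop_eq_getElem_cons hk
        rw [hdrop, hget] at this
        exact (List.cons.injEq _ _ _ _ ▸ this).2.symm
      have := ih (k+1) ht
      push_cast at this ⊢
      rw [this]
      simp only [List.length_cons]
      push_cast
      ring

lemma pv_ends (t : List Char) : ∀ (s0 : Int),
    ((((PySem.List.enumerate t s0).filter (fun pc => pvEndB pc.2)).map Prod.fst).headD
      (s0 + (t.length : Int))) = s0 + ((t.takeWhile (fun c => !pvEndB c)).length : Int) := by
  induction t with
  | nil => intro s0; simp [PySem.List.enumerate_nil]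
  | cons c t ih =>
    intro s0
    rw [PySem.List.enumerate_cons]
    by_cases h : pvEndB c
    · simp [h]
    · simp only [List.filter_cons, h, Bool.false_eq_true, if_false, List.takeWhile_cons,
        Bool.not_false, if_true]
      have := ih (s0 + 1)
      simp only [List.length_cons]
      rw [show s0 + ((t.length + 1 : Nat) : Int) = (s0 + 1) + (t.length : Int) by push_cast; ring, this]
      push_cast
      ring

lemma pv_main (s : List Char) : ∀ (k : Nat),
    pvLoopA s (k : Int) (((s.length : Int) - (k : Int)).toNat) = pvAltCore s (k : Int) := by
  intro k
  induction hm : s.length - k generalizing k with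
  | zero =>
    have hk : s.length ≤ k := by omega
    have hfuel : (((s.length : Int) - (k : Int)).toNat) = 0 := by omega
    rw [hfuel]
    simp [pvLoopA, pvAltCore, PySem.List.slice_from_natCast, List.drop_eq_nil_of_le hk]
  | succ m ih =>
    have hk : k < s.length := by omega
    set c := s[k] with hc
    have hdrop : s.drop k = c :: s.drop (k + 1) := List.drop_eq_getElem_cons hk
    have hfuel : (((s.length : Int) - (k : Int)).toNat) = m + 1 := by omega
    rw [hfuel]
    simp only [pvLoopA, PySem.List.pyGet?_natCast, List.getElem?_eq_getElem hk, ← hc]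
    by_cases hws : pvWS c
    · -- whitespace: A recurses at k+1; B's dropWhile eats c
      rw [if_neg (by intro h; rw [h] at hws; exact absurd hws (by decide))]
      rw [if_pos hws]
      have hm1 : s.length - (k + 1) = m := by omega
      have := ih (k + 1) hm1
      have hfe : m = (((s.length : Int) - ((k:Int) + 1)).toNat) := by omega
      rw [hfe, show ((k:Int) + 1) = ((k + 1 : Nat) : Int) by push_cast; ring, this]
      -- now show pvAltCore s (k+1) = pvAltCore s k
      simp only [pvAltCore, PySem.List.slice_from_natCast, hdrop, List.dropWhile_cons,
        pvWSB_eq, hws, if_true]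
    · -- non-whitespace head
      have htail : (PySem.List.slice s (some (k : Int)) none).dropWhile pvWSB = s.drop k := by
        rw [PySem.List.slice_from_natCast, hdrop, List.dropWhile_cons, pvWSB_eq, if_neg (by simp [hws])]
      have hlen : (s.drop k).length = s.length - k := List.length_drop
      have hi : ((s.length : Int) - ((s.drop k).length : Int)) = (k : Int) := by
        rw [hlen]; omega
      simp only [pvAltCore, htail, hdrop]
      by_cases hsemi : c = ';'
      · simp [hsemi]
      · rw [if_neg hsemi, if_neg hsemi, if_neg hws]
        rw [← hdrop]
        by_cases hsingle : pvSingle c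
        · have hc2 : c ≠ ']' ∧ c ≠ '[' := by
            revert hsingle; simp [pvSingle]; rintro (h | h) <;> simp [h]
          rw [if_pos hsingle, if_neg hc2.1, if_neg hc2.2,
            if_pos (show pvSingleB c = true by rw [pvSingleB_eq]; exact hsingle), hi]
        · have hsB : ¬ pvSingleB c = true := by rw [pvSingleB_eq]; exact hsingle
          rw [if_neg hsingle, if_neg hsB]
          by_cases hhash : c = '#'
          · rw [if_pos hhash, if_pos hhash, hi]
            have hslice : PySem.List.slice s (some (k : Int)) (some ((k : Int) + 2)) = (s.drop k).take 2 := by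
              rw [show ((k:Int) + 2) = ((k:Int) + ((2:Nat):Int)) by push_cast; ring,
                PySem.List.slice_natCast_add]
            rw [hslice]
          · rw [if_neg hhash, if_neg hhash]
            by_cases hcomma : c = ','
            · rw [if_pos hcomma, if_pos hcomma, hi]
              have hsl : PySem.List.slice (s.drop k) (some 1) (some 2) = (s.drop (k+1)).take 1 := by
                rw [show (1 : Int) = ((1:Nat):Int) from rfl, show (2 : Int) = ((1:Nat):Int) + ((1:Nat):Int) by norm_num,
                  PySem.List.slice_natCast_add, List.drop_drop]
              have hcond : (PySem.List.slice (s.drop k) (some 1) (some 2) = ['@'])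
                  ↔ ((k:Int) + 1 < (s.length : Int) ∧ PySem.List.pyGet? s ((k:Int) + 1) = some '@') := by
                rw [hsl, show ((k:Int) + 1) = (((k+1:Nat)):Int) by push_cast; ring, PySem.List.pyGet?_natCast]
                by_cases hlt : k + 1 < s.length
                · rw [List.drop_eq_getElem_cons hlt]
                  simp only [List.take_succ_cons, List.take_zero]
                  constructor
                  · intro h
                    have : s[k+1] = '@' := by
                      have := List.cons.injEq (s[k+1]) [] '@' [] ▸ h
                      simpa using h
                    exact ⟨by push_cast; omega, by rw [List.getElem?_eq_getElem hlt, this]⟩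
                  · rintro ⟨-, h⟩
                    rw [List.getElem?_eq_getElem hlt] at h
                    simpa using Option.some.injEq _ _ ▸ h
                · rw [List.drop_eq_nil_of_le (by omega), List.getElem?_eq_none (by omega)]
                  simp
              by_cases hat : (k:Int) + 1 < (s.length : Int) ∧ PySem.List.pyGet? s ((k:Int) + 1) = some '@'
              · rw [if_pos hat, if_pos (hcond.mpr hat)]
              · rw [if_neg hat, if_neg (fun h => hat (hcond.mp h)), hcomma]
            · rw [if_neg hcomma, if_neg hcomma, hi]
              -- token branch
              have hscan := pv_scan s (s.drop k) k rfl
              rw [hscan]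
              set tw := (s.drop k).takeWhile (fun c => !pvEnd c) with htw
              have htwB : (s.drop k).takeWhile (fun c => !pvEndB c) = tw := by
                rw [htw]; congr 1; funext x; rw [pvEndB_eq]
              have hends := pv_ends (s.drop k) 0
              simp only [zero_add] at hends
              rw [hends, htwB]
              have htwle : tw.length ≤ (s.drop k).length := (List.takeWhile_prefix _).length_le
              have htake : (s.drop k).take tw.length = tw :=
                (List.prefix_iff_eq_take.mp (List.takeWhile_prefix _)).symm
              have hsliceA : PySem.List.slice s (some (k:Int)) (some ((k:Int) + (tw.length : Int))) = tw := by
                rw [show ((k:Int) + (tw.length : Int)) = ((k:Int) + ((tw.length : Nat) : Int)) by norm_num,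
                  PySem.List.slice_natCast_add, htake]
              have hsliceB : PySem.List.slice (s.drop k) none (some ((tw.length : Nat) : Int)) = tw := by
                rw [PySem.List.slice_to_natCast, htake]
              rw [hsliceA, hsliceB]
              have hmin : min ((k:Int) + (tw.length : Int)) ((s.length : Int)) = (k:Int) + (tw.length : Int) := by
                rw [hlen] at htwle; omega
              rw [hmin]

-- ===== VERDICT (by name: the statement is the Claim_ definition above) =====
theorem next_candidate_token_spec : Claim_unchanged_next_candidate_token := by
  intro line k _ hpre hnd
  unfold Pre_next_candidate_token at hpre
  unfold D_next_candidate_token at hnd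
  have hk : 0 ≤ k := by
    rcases lt_or_ge k 0 with h | h
    · exact absurd ⟨hpre, h⟩ hnd
    · exact h
  show next_candidate_token line k = next_candidate_token_alt line k
  unfold next_candidate_token next_candidate_token_alt
  have hkk : k = ((k.toNat : Nat) : Int) := by omega
  rw [hkk]
  exact pv_main line.toList k.toNat

theorem next_candidate_token_changed : Claim_changed_next_candidate_token := by
  unfold Claim_changed_next_candidate_token; decide
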